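-- pv_equiv track=rewrite | github.com/urbandecay/rCAD_utils | rCAD_utils/vertex_resampler/operators/open_strip_common.py | _cycle_chain_between
-- ===== SOURCE A (Python) =====
-- def _cycle_chain_between(ordered_verts, start_edge_index, end_edge_index):
--     count = len(ordered_verts)
--     if count == 0:
--         return None
--
--     ordered = []
--     index = (start_edge_index + 1) % count
--     while True:
--         ordered.append(ordered_verts[index])
--         if index == end_edge_index:
--             break
--         index = (index + 1) % count
--         if len(ordered) > count:
--             return None
--
--     return ordered
-- ===== SOURCE B (Python) =====
-- def _cycle_chain_between(ordered_verts, start_edge_index, end_edge_index):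
--     count = len(ordered_verts)
--     if count == 0 or not (0 <= end_edge_index < count):
--         return None
--     start = (start_edge_index + 1) % count
--     if start <= end_edge_index:
--         return ordered_verts[start:end_edge_index + 1]
--     return ordered_verts[start:] + ordered_verts[:end_edge_index + 1]
-- ===== Notes on version B (the rewrite author's own statement) =====
-- stated objective: simpler
-- what changed: replaces the element-by-element cyclic walk with its non-termination safeguard by a range check plus one or two closed-form slices
import Mathlib
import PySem

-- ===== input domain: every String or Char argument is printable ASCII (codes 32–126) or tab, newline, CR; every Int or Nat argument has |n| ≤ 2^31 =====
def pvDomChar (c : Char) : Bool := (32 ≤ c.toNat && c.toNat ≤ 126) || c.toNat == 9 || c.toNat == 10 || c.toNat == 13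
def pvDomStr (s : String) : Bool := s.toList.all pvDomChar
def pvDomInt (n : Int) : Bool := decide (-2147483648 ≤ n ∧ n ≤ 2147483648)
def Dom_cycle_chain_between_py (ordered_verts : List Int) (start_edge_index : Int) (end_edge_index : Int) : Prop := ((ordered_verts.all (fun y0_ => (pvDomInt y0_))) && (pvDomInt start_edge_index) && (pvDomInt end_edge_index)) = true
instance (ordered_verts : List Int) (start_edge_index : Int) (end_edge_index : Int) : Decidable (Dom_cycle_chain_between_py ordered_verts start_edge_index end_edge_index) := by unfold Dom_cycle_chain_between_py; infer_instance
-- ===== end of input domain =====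

-- B replaces A's element-by-element cyclic walk (with its len>count safeguard) by a
-- range check on end_edge_index plus closed-form slicing; objective: simpler. A is total.

-- ===== PORT A =====
-- the while-loop of A; `index` is always in [0, len ov) (it is a mod by count > 0),
-- so `ordered_verts[index]` never raises and pyGetD is exact here
def cycleLoopA (ov : List Int) (endi : Int) (index : Int) (acc : List Int) : Option (List Int) :=
  if index = endi then some (acc ++ [PySem.List.pyGetD ov index 0])
  else
    if PySem.List.len ov < ((acc ++ [PySem.List.pyGetD ov index 0]).length : Int) then none
    else cycleLoopA ov endi (PySem.Int.mod (index + 1) (PySem.List.len ov))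
      (acc ++ [PySem.List.pyGetD ov index 0])
termination_by (ov.length + 1) - acc.length
decreasing_by
  simp only [PySem.List.len_eq, List.length_append, List.length_singleton, not_lt] at *
  omega

def cycle_chain_between_py (ordered_verts : List Int) (start_edge_index : Int) (end_edge_index : Int) : Option (List Int) :=
  if PySem.List.len ordered_verts = 0 then none
  else cycleLoopA ordered_verts end_edge_index
    (PySem.Int.mod (start_edge_index + 1) (PySem.List.len ordered_verts)) []

-- ===== PORT B =====
def cycle_chain_between_py_alt (ordered_verts : List Int) (start_edge_index : Int) (end_edge_index : Int) : Option (List Int) :=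
  -- count = len(ordered_verts); start = (start_edge_index + 1) % count, inlined
  if PySem.List.len ordered_verts = 0 ∨
      ¬ (0 ≤ end_edge_index ∧ end_edge_index < PySem.List.len ordered_verts) then none
  else if PySem.Int.mod (start_edge_index + 1) (PySem.List.len ordered_verts) ≤ end_edge_index then
    some (PySem.List.slice ordered_verts
      (some (PySem.Int.mod (start_edge_index + 1) (PySem.List.len ordered_verts)))
      (some (end_edge_index + 1)))
  else
    some (PySem.List.slice ordered_verts
      (some (PySem.Int.mod (start_edge_index + 1) (PySem.List.len ordered_verts))) none ++
      PySem.List.slice ordered_verts none (some (end_edge_index + 1)))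

-- ===== PRECONDITION & SPEC =====
def Spec_cycle_chain_between_py (ordered_verts : List Int) (start_edge_index : Int) (end_edge_index : Int) (out : Option (List Int)) : Prop := out = cycle_chain_between_py_alt ordered_verts start_edge_index end_edge_index
instance (ordered_verts : List Int) (start_edge_index : Int) (end_edge_index : Int) (out : Option (List Int)) : Decidable (Spec_cycle_chain_between_py ordered_verts start_edge_index end_edge_index out) := by unfold Spec_cycle_chain_between_py; infer_instance

-- ===== CLAIM (what is proved, stated in full; the proofs are below) =====
def Claim_equal_cycle_chain_between_py : Prop := ∀ (ordered_verts : List Int) (start_edge_index : Int) (end_edge_index : Int), Dom_cycle_chain_between_py ordered_verts start_edge_index end_edge_index → Spec_cycle_chain_between_py ordered_verts start_edge_index end_edge_index (cycle_chain_between_py ordered_verts start_edge_index end_edge_index)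

-- ===== LEMMAS AND PROOFS =====

-- ascending stretch: from index i with i ≤ e < len, the loop appends ov[i..e] and stops
theorem cycleLoopA_asc (ov : List Int) (e : Int) (he : e < (ov.length : Int)) :
    ∀ (d : Nat) (i : Int) (acc : List Int), 0 ≤ i → i ≤ e → (e - i).toNat = d →
      acc.length + d + 1 ≤ ov.length →
      cycleLoopA ov e i acc = some (acc ++ (ov.drop i.toNat).take (d + 1)) := by
  intro d
  induction d with
  | zero =>
    intro i acc h0 hie hd hlen
    have hieq : i = e := by omega
    have hi : i.toNat < ov.length := by omega
    subst hieq
    rw [cycleLoopA, if_pos rfl, PySem.List.pyGetD_eq_getElem ov 0 h0 he,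
      List.drop_eq_getElem_cons hi, List.take_succ_cons, List.take_zero]
  | succ d ih =>
    intro i acc h0 hie hd hlen
    have hilt : i < e := by omega
    have hi : i.toNat < ov.length := by omega
    rw [cycleLoopA, if_neg (by omega : ¬ i = e), if_neg (by
      simp only [PySem.List.len_eq, List.length_append, List.length_singleton, not_lt]
      push_cast; omega)]
    have hmod : PySem.Int.mod (i + 1) (PySem.List.len ov) = i + 1 := by
      rw [PySem.List.len_eq, PySem.Int.mod_eq_emod_of_pos (by omega)]
      exact Int.emod_eq_of_lt (by omega) (by omega)
    rw [hmod, ih (i + 1) _ (by omega) (by omega) (by omega) (by simp; omega)]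
    have h1 : (i + 1).toNat = i.toNat + 1 := by omega
    rw [PySem.List.pyGetD_eq_getElem ov (i := i) 0 h0 (by omega), h1,
      List.drop_eq_getElem_cons hi, List.take_succ_cons]
    simp

-- wrapping stretch: from index i with e < i < len, the loop runs to the end of the
-- list, wraps to 0 and finishes with the ascending stretch
theorem cycleLoopA_wrap (ov : List Int) (e : Int) (he0 : 0 ≤ e) (he : e < (ov.length : Int)) :
    ∀ (d : Nat) (i : Int) (acc : List Int), e < i → i < (ov.length : Int) →
      ((ov.length : Int) - i).toNat = d → acc.length + d + e.toNat + 1 ≤ ov.length →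
      cycleLoopA ov e i acc = some (acc ++ ov.drop i.toNat ++ ov.take (e.toNat + 1)) := by
  intro d
  induction d with
  | zero => intro i acc hei hil hd hlen; omega
  | succ d ih =>
    intro i acc hei hil hd hlen
    have hi : i.toNat < ov.length := by omega
    rw [cycleLoopA, if_neg (by omega : ¬ i = e), if_neg (by
      simp only [PySem.List.len_eq, List.length_append, List.length_singleton, not_lt]
      push_cast; omega)]
    have hv := PySem.List.pyGetD_eq_getElem ov (i := i) 0 (by omega) hil
    by_cases hlast : i + 1 < (ov.length : Int)
    · have hmod : PySem.Int.mod (i + 1) (PySem.List.len ov) = i + 1 := by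
        rw [PySem.List.len_eq, PySem.Int.mod_eq_emod_of_pos (by omega)]
        exact Int.emod_eq_of_lt (by omega) (by omega)
      rw [hmod, ih (i + 1) _ (by omega) (by omega) (by omega) (by simp; omega)]
      have h1 : (i + 1).toNat = i.toNat + 1 := by omega
      rw [hv, h1, List.drop_eq_getElem_cons hi]
      simp
    · -- i is the last index: wrap to 0 and run the ascending stretch from 0
      have hieq : i.toNat = ov.length - 1 := by omega
      have hmod : PySem.Int.mod (i + 1) (PySem.List.len ov) = 0 := by
        rw [PySem.List.len_eq, PySem.Int.mod_eq_emod_of_pos (by omega)]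
        have h2 : i + 1 = (ov.length : Int) := by omega
        rw [h2]; exact Int.emod_self
      rw [hmod, cycleLoopA_asc ov e he e.toNat 0 _ le_rfl (by omega) (by omega)
        (by simp; omega)]
      have hdrop : ov.drop (i.toNat + 1) = [] := List.drop_eq_nil_of_le (by omega)
      rw [hv, List.drop_eq_getElem_cons hi, hdrop]
      simp

-- with e outside [0, len) the loop never breaks and the safeguard returns none
theorem cycleLoopA_none (ov : List Int) (e : Int) (hne : e < 0 ∨ (ov.length : Int) ≤ e) :
    ∀ (d : Nat) (i : Int) (acc : List Int), 0 ≤ i → i < (ov.length : Int) →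
      ov.length - acc.length = d → acc.length ≤ ov.length →
      cycleLoopA ov e i acc = none := by
  intro d
  induction d with
  | zero =>
    intro i acc h0 hil hd hlen
    rw [cycleLoopA, if_neg (by omega : ¬ i = e), if_pos (by
      simp only [PySem.List.len_eq, List.length_append, List.length_singleton]
      push_cast; omega)]
  | succ d ih =>
    intro i acc h0 hil hd hlen
    rw [cycleLoopA, if_neg (by omega : ¬ i = e), if_neg (by
      simp only [PySem.List.len_eq, List.length_append, List.length_singleton, not_lt]
      push_cast; omega)]
    have hpos : (0 : Int) < PySem.List.len ov := by
      rw [PySem.List.len_eq]; exact_mod_cast (by omega : (0:Int) < ov.length)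
    exact ih _ _ (PySem.Int.mod_nonneg _ hpos)
      (by have h2 := PySem.Int.mod_lt (i + 1) hpos; rwa [PySem.List.len_eq] at h2)
      (by simp; omega) (by simp; omega)

-- ===== VERDICT (by name: the statement is the Claim_ definition above) =====
theorem cycle_chain_between_py_spec : Claim_equal_cycle_chain_between_py := by
  intro ov s e _
  unfold Spec_cycle_chain_between_py cycle_chain_between_py cycle_chain_between_py_alt
  simp only [PySem.List.len_eq]
  by_cases hn : ov.length = 0
  · simp [hn]
  · have hn' : 0 < ov.length := Nat.pos_of_ne_zero hn
    have hlen0 : ¬ ((ov.length : Int) = 0) := by exact_mod_cast hn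
    have hpos : (0 : Int) < (ov.length : Int) := by exact_mod_cast hn'
    have hst0 : 0 ≤ PySem.Int.mod (s + 1) (ov.length : Int) :=
      PySem.Int.mod_nonneg _ hpos
    have hstlt : PySem.Int.mod (s + 1) (ov.length : Int) < (ov.length : Int) :=
      PySem.Int.mod_lt (s + 1) hpos
    rw [if_neg hlen0]
    by_cases he : 0 ≤ e ∧ e < (ov.length : Int)
    · obtain ⟨he0, helt⟩ := he
      rw [if_neg (by simp only [not_or, not_not]; exact ⟨hlen0, he0, helt⟩)]
      by_cases hle : PySem.Int.mod (s + 1) (ov.length : Int) ≤ e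
      · rw [if_pos hle,
          cycleLoopA_asc ov e helt (e - PySem.Int.mod (s + 1) (ov.length : Int)).toNat
            _ [] hst0 hle rfl (by simp only [List.length_nil]; omega),
          PySem.List.slice_toNat ov hst0 (by omega)]
        have h3 : (e + 1).toNat - (PySem.Int.mod (s + 1) (ov.length : Int)).toNat
            = (e - PySem.Int.mod (s + 1) (ov.length : Int)).toNat + 1 := by omega
        rw [h3]; simp
      · rw [if_neg hle,
          cycleLoopA_wrap ov e he0 helt
            ((ov.length : Int) - PySem.Int.mod (s + 1) (ov.length : Int)).toNat
            _ [] (by omega) hstlt rfl (by simp only [List.length_nil]; omega),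
          PySem.List.slice_from ov hst0, PySem.List.slice_to ov (by omega)]
        have h3 : (e + 1).toNat = e.toNat + 1 := by omega
        rw [h3]; simp
    · rw [if_pos (Or.inr he)]
      have hne : e < 0 ∨ (ov.length : Int) ≤ e := by
        simp only [not_and, not_lt] at he
        by_cases h0 : 0 ≤ e
        · exact Or.inr (he h0)
        · exact Or.inl (by omega)
      exact cycleLoopA_none ov e hne ov.length _ [] hst0 hstlt (by simp) (by simp)
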